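-- pv_equiv track=rewrite | github.com/milnepe/RadioGlobe | radioglobe/positional_encoders.py | check_parity
-- ===== SOURCE A (Python) =====
-- def check_parity(reading: int):
--     reading_without_parity_bit = reading >> 1
--     parity_bit = reading & 0b1
--
--     computed_parity = 0
--     while reading_without_parity_bit:
--         computed_parity ^= reading_without_parity_bit & 0b1
--         reading_without_parity_bit >>= 1
--
--     return parity_bit == computed_parity
-- ===== SOURCE B (Python) =====
-- def check_parity(reading: int):
--     return (reading & 1) == (bin(reading >> 1).count("1") & 1)
-- ===== Notes on version B (the rewrite author's own statement) =====
-- stated objective: idiomatic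
-- what changed: Replaces the XOR-folding while-loop over the bits with a single expression that counts the set bits of the payload via the binary string and reduces the count mod two; also terminates on negative readings where A loops forever.
import Mathlib
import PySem

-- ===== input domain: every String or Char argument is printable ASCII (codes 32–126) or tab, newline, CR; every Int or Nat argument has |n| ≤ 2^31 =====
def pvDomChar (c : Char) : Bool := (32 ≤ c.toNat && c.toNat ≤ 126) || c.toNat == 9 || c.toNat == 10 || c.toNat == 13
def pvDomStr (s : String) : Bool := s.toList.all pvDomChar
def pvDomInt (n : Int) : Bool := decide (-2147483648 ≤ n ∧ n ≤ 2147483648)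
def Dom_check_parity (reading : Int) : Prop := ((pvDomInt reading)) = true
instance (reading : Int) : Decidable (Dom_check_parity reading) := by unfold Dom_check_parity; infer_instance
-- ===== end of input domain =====

-- B replaces A's XOR-folding while-loop with a popcount-mod-2 one-liner (idiomatic; same asymptotic cost).

-- ===== PORT A =====
-- A's `while reading_without_parity_bit:` loop; the `x ≤ 0` guard only totalizes the
-- recursion: for x ≥ 0 it coincides with Python's `x != 0`, and negative x (where the
-- Python loop never terminates) is excluded by Pre_check_parity.
def pvLoopA (acc x : Int) : Int :=
  if _h : x ≤ 0 then acc
  else pvLoopA (PySem.Int.bxor acc (PySem.Int.band x 1)) (PySem.Int.floordiv x 2)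
termination_by x.toNat
decreasing_by
  have h2 : PySem.Int.floordiv x 2 = x / 2 := PySem.Int.floordiv_eq_ediv_of_pos (by omega)
  simp only [h2]; omega

def check_parity (reading : Int) : Bool :=
  let reading_without_parity_bit := PySem.Int.floordiv reading 2
  let parity_bit := PySem.Int.band reading 1
  let computed_parity := pvLoopA 0 reading_without_parity_bit
  parity_bit == computed_parity

-- ===== PORT B =====
-- `bin(reading >> 1).count("1")` = number of set bits of |reading >> 1| = PySem.Int.bitCount
def check_parity_alt (reading : Int) : Bool :=
  PySem.Int.band reading 1 == ((PySem.Int.bitCount (PySem.Int.floordiv reading 2) &&& 1 : Nat) : Int)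

-- ===== PRECONDITION & SPEC =====
-- Pre_ excludes negative readings: A's while-loop never terminates there (reading >> 1 stays negative).
def Pre_check_parity (reading : Int) : Prop := 0 ≤ reading
instance (reading : Int) : Decidable (Pre_check_parity reading) := by unfold Pre_check_parity; infer_instance
def pvWitness_check_parity : Int := (6)

def Spec_check_parity (reading : Int) (out : Bool) : Prop := out = check_parity_alt reading
instance (reading : Int) (out : Bool) : Decidable (Spec_check_parity reading out) := by unfold Spec_check_parity; infer_instance

-- ===== CLAIM (what is proved, stated in full; the proofs are below) =====
def Claim_equal_check_parity : Prop := ∀ (reading : Int), Dom_check_parity reading → Pre_check_parity reading → Spec_check_parity reading (check_parity reading)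

-- ===== LEMMAS AND PROOFS =====

-- Loop invariant: folding XOR over the bits of n computes (acc + popcount n) mod 2.
theorem pvLoopA_eq (n : Nat) : ∀ acc : Nat, acc ≤ 1 →
    pvLoopA (acc : Int) (n : Int) = (((acc + PySem.Int.bitCount (n : Int)) % 2 : Nat) : Int) := by
  induction n using Nat.strong_induction_on with
  | _ n ih =>
    intro acc hacc
    by_cases h0 : n = 0
    · subst h0
      rw [pvLoopA]
      simp [PySem.Int.bitCount_zero]
      omega
    · rw [pvLoopA]
      have hpos : ¬ ((n : Int) ≤ 0) := by omega
      simp only [hpos, dite_false]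
      rw [PySem.Int.band_one, show ((2:Int)) = ((2:Nat):Int) from rfl,
        PySem.Int.mod_natCast, PySem.Int.floordiv_natCast, PySem.Int.bxor_natCast]
      have hx : acc ^^^ n % 2 ≤ 1 := by
        have h1 : n % 2 = 0 ∨ n % 2 = 1 := by omega
        interval_cases acc <;> rcases h1 with h | h <;> simp [h]
      rw [ih (n / 2) (by omega) (acc ^^^ n % 2) hx]
      have hbc : PySem.Int.bitCount ((n : Nat) : Int)
          = n % 2 + PySem.Int.bitCount ((n / 2 : Nat) : Int) :=
        PySem.Int.bitCount_natCast (by omega)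
      congr 1
      have hb : n % 2 = 0 ∨ n % 2 = 1 := by omega
      interval_cases acc <;> rcases hb with hb | hb <;>
        simp only [hb, hbc, Nat.zero_xor, Nat.xor_zero, Nat.xor_self] <;> omega

-- ===== VERDICT (by name: the statement is the Claim_ definition above) =====
theorem check_parity_spec : Claim_equal_check_parity := by
  intro reading _ hpre
  unfold Pre_check_parity at hpre
  obtain ⟨m, rfl⟩ : ∃ m : Nat, reading = (m : Int) := ⟨reading.toNat, by omega⟩
  unfold Spec_check_parity check_parity check_parity_alt
  show (PySem.Int.band (↑m) 1 == pvLoopA 0 (PySem.Int.floordiv (↑m) 2)) = _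
  rw [show ((2:Int)) = ((2:Nat):Int) from rfl, PySem.Int.floordiv_natCast]
  rw [show ((0:Int)) = ((0:Nat):Int) from rfl, pvLoopA_eq (m / 2) 0 (by omega)]
  rw [Nat.and_one_is_mod]
  simp
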